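-- pv_equiv track=rewrite | github.com/noahsark769/interview-questions | algorithms/python-tuple-increment/increment.py | tuple_increment
-- ===== SOURCE A (Python) =====
-- def tuple_increment(tup):
-- 	"""Given a tuple where each element is a single digit number, we can think
-- 	of the entire tuple as a number itself, with the elements its digits. We
-- 	return another tuple, which represents the original number incremented by
-- 	one."""
-- 	carry = True
-- 	position = len(tup) - 1
-- 	new_list = list(tup)
--
-- 	while carry:
-- 		if position < 0:
-- 			return (1,) + tuple(0 for _ in range(len(tup)))
-- 		if tup[position] != 9:
-- 			carry = False
-- 		new_list[position] = next_single_digit(tup[position])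
-- 		position -= 1
-- 	return tuple(new_list)
--
-- def next_single_digit(digit):
-- 	"""Given a digit in [0, 9], return the next single digit"""
-- 	return (digit + 1) % 10
-- ===== SOURCE B (Python) =====
-- def tuple_increment(tup):
--     """Recursive carry-threading reimplementation: peel the last digit;
--     9 carries into the prefix, anything else is bumped mod 10."""
--     if not tup:
--         return (1,)
--     if tup[-1] == 9:
--         return tuple_increment(tup[:-1]) + (0,)
--     return tup[:-1] + ((tup[-1] + 1) % 10,)
-- ===== Notes on version B (the rewrite author's own statement) =====
-- stated objective: simpler
-- what changed: Replaces the index/carry while-loop over a mutable list copy with a three-line recursion that peels the last digit and threads the carry through the recursive call.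
import Mathlib
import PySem

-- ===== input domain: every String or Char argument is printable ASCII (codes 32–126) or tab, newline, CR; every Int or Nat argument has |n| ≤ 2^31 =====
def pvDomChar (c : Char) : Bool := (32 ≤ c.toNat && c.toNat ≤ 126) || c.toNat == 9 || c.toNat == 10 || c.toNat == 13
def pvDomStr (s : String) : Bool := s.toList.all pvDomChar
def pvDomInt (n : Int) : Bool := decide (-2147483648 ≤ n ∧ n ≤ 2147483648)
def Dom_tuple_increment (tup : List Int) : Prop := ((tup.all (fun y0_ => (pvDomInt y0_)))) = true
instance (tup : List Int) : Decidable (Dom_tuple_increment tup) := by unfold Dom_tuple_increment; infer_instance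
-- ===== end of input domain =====

-- B replaces A's index/carry while-loop over a mutable list with a recursion
-- that peels the last digit and threads the carry through the recursive call (objective: simpler).


-- ===== PORT A =====
-- next_single_digit(digit) = (digit + 1) % 10
def next_single_digit (digit : Int) : Int := PySem.Int.mod (digit + 1) 10

-- A's while-loop: `k` encodes `position + 1` (so `k = 0` is `position < 0`);
-- position is always a valid nonnegative index here, so tup[position] is
-- tup.getD (position) 0 and new_list[position] = x is List.set.
def tuple_increment_loop (tup : List Int) (new_list : List Int) : Nat → List Int
  | 0 => 1 :: List.replicate tup.length 0        -- (1,) + tuple(0 for _ in range(len(tup)))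
  | k + 1 =>
      let d := tup.getD k 0
      let nl := new_list.set k (next_single_digit d)
      if d ≠ 9 then nl                            -- carry = False: loop exits after this update
      else tuple_increment_loop tup nl k

def tuple_increment (tup : List Int) : List Int :=
  tuple_increment_loop tup tup tup.length        -- carry=True, position=len(tup)-1, new_list=list(tup)

-- ===== PORT B =====
def tuple_increment_alt (tup : List Int) : List Int :=
  if h : tup = [] then [1]
  else if tup.getLast h = 9 then tuple_increment_alt tup.dropLast ++ [0]
  else tup.dropLast ++ [PySem.Int.mod (tup.getLast h + 1) 10]
termination_by tup.length
decreasing_by simp [List.length_dropLast]; exact List.length_pos_iff.mpr h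

-- ===== PRECONDITION & SPEC =====
def Spec_tuple_increment (tup : List Int) (out : List Int) : Prop := out = tuple_increment_alt tup
instance (tup : List Int) (out : List Int) : Decidable (Spec_tuple_increment tup out) := by unfold Spec_tuple_increment; infer_instance

-- ===== CLAIM (what is proved, stated in full; the proofs are below) =====
def Claim_equal_tuple_increment : Prop := ∀ (tup : List Int), Dom_tuple_increment tup → Spec_tuple_increment tup (tuple_increment tup)

-- ===== LEMMAS AND PROOFS =====

theorem alt_nil : tuple_increment_alt [] = [1] := by
  rw [tuple_increment_alt.eq_def]; simp

theorem alt_append_singleton (xs : List Int) (a : Int) :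
    tuple_increment_alt (xs ++ [a]) =
      if a = 9 then tuple_increment_alt xs ++ [0]
      else xs ++ [PySem.Int.mod (a + 1) 10] := by
  rw [tuple_increment_alt.eq_def]
  simp

-- Loop invariant: entering the loop with position = k - 1, new_list is the
-- original prefix of length k followed by zeros (all processed digits were 9),
-- and the loop finishes the prefix exactly like B does.
theorem loop_eq_alt (tup : List Int) :
    ∀ k : Nat, k ≤ tup.length →
      tuple_increment_loop tup (tup.take k ++ List.replicate (tup.length - k) 0) k
        = tuple_increment_alt (tup.take k) ++ List.replicate (tup.length - k) 0 := by
  intro k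
  induction k with
  | zero => intro _; simp [tuple_increment_loop, alt_nil]
  | succ k ih =>
      intro hk
      have hklt : k < tup.length := hk
      have htake : tup.take (k + 1) = tup.take k ++ [tup[k]] := by
        rw [List.take_add_one]
        simp [List.getElem?_eq_getElem hklt]
      have hd' : tup[k]?.getD 0 = tup[k] := by simp [List.getElem?_eq_getElem hklt]
      have hsingle : (tup.take k ++ [tup[k]]).set k (next_single_digit tup[k])
          = tup.take k ++ [next_single_digit tup[k]] := by
        rw [List.set_append]
        simp [List.length_take, Nat.min_eq_left (Nat.le_of_lt hklt)]
      have hset : (tup.take (k + 1) ++ List.replicate (tup.length - (k + 1)) 0).set k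
            (next_single_digit tup[k])
          = tup.take k ++ [next_single_digit tup[k]] ++ List.replicate (tup.length - (k + 1)) 0 := by
        rw [htake, List.set_append,
          if_pos (by simp [List.length_take]; omega), hsingle]
      rw [tuple_increment_loop]
      simp only [List.getD, hd', hset]
      by_cases h9 : tup[k] = 9
      · rw [if_neg (by simp [h9])]
        have hnsd : next_single_digit (9 : Int) = 0 := by decide
        have hmerge : tup.take k ++ [next_single_digit tup[k]] ++ List.replicate (tup.length - (k + 1)) 0
            = tup.take k ++ List.replicate (tup.length - k) 0 := by
          rw [h9, hnsd]
          have : tup.length - k = (tup.length - (k + 1)) + 1 := by omega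
          rw [this, List.replicate_succ]
          simp
        rw [hmerge, ih (Nat.le_of_lt hklt), htake, alt_append_singleton, if_pos h9]
        have : tup.length - k = (tup.length - (k + 1)) + 1 := by omega
        rw [this, List.replicate_succ]
        simp
      · rw [if_pos (by simp [h9])]
        rw [htake, alt_append_singleton, if_neg h9]
        simp [next_single_digit]

theorem tuple_increment_spec : Claim_equal_tuple_increment := by
  intro tup _
  unfold Spec_tuple_increment tuple_increment
  have h := loop_eq_alt tup tup.length (le_refl _)
  simpa using h
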